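-- pv_equiv track=rewrite | github.com/RemKamal/cracking-the-coding-interview-6-python | 1_arrays_and_strings/code/4_palindrome_permutation.py | unify_letter
-- ===== SOURCE A (Python) =====
-- def unify_letter(s):
-- 	checker = {}
-- 	for letter in s:
-- 		letter = letter.lower()
-- 		if letter in checker:
-- 			checker[letter] ^= 1
-- 		else:
-- 			checker[letter] = 0
-- 	return checker
-- ===== SOURCE B (Python) =====
-- def unify_letter(s):
--     counts = {}
--     for ch in s:
--         key = ch.lower()
--         counts[key] = counts.get(key, 0) + 1
--     return {letter: (cnt - 1) % 2 for letter, cnt in counts.items()}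
-- ===== Notes on version B (the rewrite author's own statement) =====
-- stated objective: alternative
-- what changed: Replaces A's inline first-sight-0 / XOR-1 toggle with a count-then-transform decomposition: one pass builds full case-insensitive character counts, then a dict comprehension maps each count c to its parity (c-1)%2.
import Mathlib
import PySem

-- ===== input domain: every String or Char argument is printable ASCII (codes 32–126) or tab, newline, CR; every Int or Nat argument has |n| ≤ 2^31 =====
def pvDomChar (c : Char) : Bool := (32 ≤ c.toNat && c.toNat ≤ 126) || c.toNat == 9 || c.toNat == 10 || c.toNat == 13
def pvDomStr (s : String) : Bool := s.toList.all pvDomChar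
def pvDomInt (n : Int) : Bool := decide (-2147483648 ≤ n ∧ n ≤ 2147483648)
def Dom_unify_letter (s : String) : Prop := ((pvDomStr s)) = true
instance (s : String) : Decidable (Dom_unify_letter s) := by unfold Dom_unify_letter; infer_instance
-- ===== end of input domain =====

-- B replaces A's inline parity toggle by a count-then-transform decomposition (same cost): alternative.

-- ===== PORT A =====
def unify_letter (s : String) : List (String × Int) :=
  (s.toList.foldl (fun checker c =>
      let letter := PySem.Str.lower (String.ofList [c])
      if checker.contains letter then
        checker.insert letter (PySem.Int.bxor (checker.getD letter 0) 1)
      else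
        checker.insert letter 0)
    (PySem.Dict.empty : PySem.Dict String Int)).items

-- ===== PORT B =====
def unify_letter_alt (s : String) : List (String × Int) :=
  let counts := s.toList.foldl (fun d c =>
      let key := PySem.Str.lower (String.ofList [c])
      d.insert key (d.getD key 0 + 1))
    (PySem.Dict.empty : PySem.Dict String Int)
  counts.items.map (fun p => (p.1, PySem.Int.mod (p.2 - 1) 2))

-- ===== PRECONDITION & SPEC =====
def Spec_unify_letter (s : String) (out : List (String × Int)) : Prop := out = unify_letter_alt s
instance (s : String) (out : List (String × Int)) : Decidable (Spec_unify_letter s out) := by unfold Spec_unify_letter; infer_instance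

-- ===== CLAIM (what is proved, stated in full; the proofs are below) =====
def Claim_equal_unify_letter : Prop := ∀ (s : String), Dom_unify_letter s → Spec_unify_letter s (unify_letter s)

-- ===== LEMMAS AND PROOFS =====

-- the parity transform applied to one item / to a whole dict
def pvParity (p : String × Int) : String × Int := (p.1, PySem.Int.mod (p.2 - 1) 2)

def pvMapd (d : PySem.Dict String Int) : PySem.Dict String Int :=
  PySem.Dict.mk (d.items.map pvParity)

theorem pvParity_xor (v : Int) :
    PySem.Int.bxor (PySem.Int.mod (v - 1) 2) 1 = PySem.Int.mod v 2 := by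
  rw [PySem.Int.mod_eq_emod_of_pos (by norm_num), PySem.Int.mod_eq_emod_of_pos (by norm_num)]
  rcases Int.emod_two_eq (v - 1) with h | h
  · have hv : v % 2 = 1 := by omega
    rw [h, hv]; decide
  · have hv : v % 2 = 0 := by omega
    rw [h, hv]; decide

theorem pv_get?_map (l : List (String × Int)) (k : String) :
    (PySem.Dict.mk (l.map pvParity)).get? k
      = ((PySem.Dict.mk l).get? k).map (fun v => PySem.Int.mod (v - 1) 2) := by
  induction l with
  | nil => simp [PySem.Dict.get?]
  | cons p rest ih =>
    simp only [List.map_cons, pvParity]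
    rw [PySem.Dict.get?_mk_cons, PySem.Dict.get?_mk_cons]
    by_cases h : p.1 == k
    · simp [h]
    · simp [h, ih]

theorem pv_contains_map (l : List (String × Int)) (k : String) :
    (PySem.Dict.mk (l.map pvParity)).contains k = (PySem.Dict.mk l).contains k := by
  rw [PySem.Dict.contains_eq_isSome_get?, PySem.Dict.contains_eq_isSome_get?, pv_get?_map]
  cases (PySem.Dict.mk l).get? k <;> rfl

-- one loop step commutes with the parity transform
theorem pv_step (d : PySem.Dict String Int) (k : String) :
    (if (pvMapd d).contains k then
        (pvMapd d).insert k (PySem.Int.bxor ((pvMapd d).getD k 0) 1)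
      else (pvMapd d).insert k 0)
      = pvMapd (d.insert k (d.getD k 0 + 1)) := by
  unfold pvMapd
  by_cases hc : d.contains k = true
  · rw [pv_contains_map]
    simp only [hc, if_true]
    have hD : (PySem.Dict.mk (d.items.map pvParity)).getD k 0
        = PySem.Int.mod (d.getD k 0 - 1) 2 := by
      rw [PySem.Dict.getD_eq_get?_getD, pv_get?_map, PySem.Dict.getD_eq_get?_getD]
      rcases hgo : d.get? k with _ | v
      · rw [PySem.Dict.contains_eq_isSome_get?, hgo] at hc
        simp at hc
      · simp
    apply PySem.Dict.ext
    rw [PySem.Dict.items_insert_of_contains _ _ (by rwa [pv_contains_map]),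
        PySem.Dict.items_insert_of_contains _ _ hc]
    rw [List.map_map, List.map_map]
    refine List.map_congr_left (fun p _ => ?_)
    by_cases h : p.1 == k
    · simp only [Function.comp, pvParity, h, if_true]
      rw [hD, pvParity_xor]
      have h1 : d.getD k 0 + 1 - 1 = d.getD k 0 := by ring
      rw [h1]
    · simp [Function.comp, pvParity, h]
  · have hcf : d.contains k = false := by simpa using hc
    rw [pv_contains_map]
    simp only [hcf, if_false, Bool.false_eq_true]
    apply PySem.Dict.ext
    rw [PySem.Dict.items_insert_of_not_contains _ _ (by rw [pv_contains_map]; exact hcf),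
        PySem.Dict.items_insert_of_not_contains _ _ hcf]
    simp only [List.map_append, List.map_cons, List.map_nil, pvParity]
    rw [PySem.Dict.getD_of_not_contains _ _ hcf]
    norm_num

-- the whole loop commutes with the parity transform
theorem pv_fold (cs : List Char) (d : PySem.Dict String Int) :
    cs.foldl (fun checker c =>
        let letter := PySem.Str.lower (String.ofList [c])
        if checker.contains letter then
          checker.insert letter (PySem.Int.bxor (checker.getD letter 0) 1)
        else
          checker.insert letter 0) (pvMapd d)
      = pvMapd (cs.foldl (fun d c =>
          let key := PySem.Str.lower (String.ofList [c])
          d.insert key (d.getD key 0 + 1)) d) := by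
  induction cs generalizing d with
  | nil => rfl
  | cons c rest ih => simp only [List.foldl_cons, pv_step, ih]

theorem pvMapd_empty : pvMapd (PySem.Dict.empty : PySem.Dict String Int) = PySem.Dict.empty := rfl

-- ===== VERDICT (by name: the statement is the Claim_ definition above) =====
theorem unify_letter_spec : Claim_equal_unify_letter := by
  intro s _
  show unify_letter s = unify_letter_alt s
  unfold unify_letter unify_letter_alt
  conv_lhs => rw [← pvMapd_empty, pv_fold]
  rfl
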